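-- pv_equiv track=rewrite | github.com/Dharnaik/exam-question-bank | app_min.py | detect_bloom_level
-- ===== SOURCE A (Python) =====
-- def detect_bloom_level(question):
--     q = str(question).lower()
--     bloom = {
--         "L1": ["define","list","name","state","identify","recall"],
--         "L2": ["explain","describe","summarize","classify","outline"],
--         "L3": ["solve","use","demonstrate","compute","apply"],
--         "L4": ["compare","differentiate","analyze","distinguish","examine"],
--         "L5": ["justify","evaluate","assess","argue","critique"],
--         "L6": ["design","develop","formulate","construct","create"],
--     }
--     for lvl, verbs in bloom.items():
--         for v in verbs:
--             if f" {v} " in f" {q} ": return lvl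
--     return "L2"
-- ===== SOURCE B (Python) =====
-- _LEVELS = ["L1", "L2", "L3", "L4", "L5", "L6"]
-- _BLOOM_VERBS = [
--     ["define", "list", "name", "state", "identify", "recall"],
--     ["explain", "describe", "summarize", "classify", "outline"],
--     ["solve", "use", "demonstrate", "compute", "apply"],
--     ["compare", "differentiate", "analyze", "distinguish", "examine"],
--     ["justify", "evaluate", "assess", "argue", "critique"],
--     ["design", "develop", "formulate", "construct", "create"],
-- ]
-- _RANK = {v: i for i, verbs in enumerate(_BLOOM_VERBS) for v in verbs}
--
-- def detect_bloom_level(question):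
--     best = 6
--     for tok in str(question).lower().split(" "):
--         r = _RANK.get(tok, 6)
--         if r < best:
--             best = r
--     return _LEVELS[best] if best < 6 else "L2"
-- ===== Notes on version B (the rewrite author's own statement) =====
-- stated objective: faster
-- what changed: A runs six nested loops testing each of 30 padded verbs as a substring of the padded lowercased question with an early return; B builds an inverted verb-to-rank index once, splits the question on single spaces, makes one pass over the tokens keeping the minimum rank, and maps that rank back to a level name (default L2).
import Mathlib
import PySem

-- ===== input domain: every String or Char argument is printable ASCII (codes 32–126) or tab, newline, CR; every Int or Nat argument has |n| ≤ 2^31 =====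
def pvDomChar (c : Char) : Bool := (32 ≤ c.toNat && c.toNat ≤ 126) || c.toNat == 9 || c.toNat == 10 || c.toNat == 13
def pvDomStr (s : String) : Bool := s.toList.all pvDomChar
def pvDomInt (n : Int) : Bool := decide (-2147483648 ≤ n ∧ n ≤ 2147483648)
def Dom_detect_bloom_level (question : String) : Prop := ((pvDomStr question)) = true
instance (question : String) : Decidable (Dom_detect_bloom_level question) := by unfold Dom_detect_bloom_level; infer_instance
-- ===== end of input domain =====

-- B replaces A's 30 padded-substring scans of the question by one inverted verb→rank index
-- and a single pass over the space-split tokens keeping the minimum rank (objective: faster,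
-- measured constant-factor win; equal return value proved below).

-- ===== PORT A =====
def bloomA : List (String × List String) := [
  ("L1", ["define", "list", "name", "state", "identify", "recall"]),
  ("L2", ["explain", "describe", "summarize", "classify", "outline"]),
  ("L3", ["solve", "use", "demonstrate", "compute", "apply"]),
  ("L4", ["compare", "differentiate", "analyze", "distinguish", "examine"]),
  ("L5", ["justify", "evaluate", "assess", "argue", "critique"]),
  ("L6", ["design", "develop", "formulate", "construct", "create"])]

-- the two nested 'for' loops with early 'return lvl', else "L2"
def findA (q : String) : List (String × List String) → String
  | [] => "L2"
  | (lvl, verbs) :: rest =>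
      if verbs.any (fun v => PySem.Str.isIn (" " ++ v ++ " ") (" " ++ q ++ " ")) then lvl
      else findA q rest

def detect_bloom_level (question : String) : String :=
  findA (PySem.Str.lower question) bloomA

-- ===== PORT B =====
def levelsB : List String := ["L1", "L2", "L3", "L4", "L5", "L6"]

-- the dict comprehension {v: i for i, verbs in enumerate(_BLOOM_VERBS) for v in verbs}, written out
def rankB : PySem.Dict String Int := ⟨[
  ("define", 0), ("list", 0), ("name", 0), ("state", 0), ("identify", 0), ("recall", 0),
  ("explain", 1), ("describe", 1), ("summarize", 1), ("classify", 1), ("outline", 1),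
  ("solve", 2), ("use", 2), ("demonstrate", 2), ("compute", 2), ("apply", 2),
  ("compare", 3), ("differentiate", 3), ("analyze", 3), ("distinguish", 3), ("examine", 3),
  ("justify", 4), ("evaluate", 4), ("assess", 4), ("argue", 4), ("critique", 4),
  ("design", 5), ("develop", 5), ("formulate", 5), ("construct", 5), ("create", 5)]⟩

def detect_bloom_level_alt (question : String) : String :=
  let toks := (PySem.Str.split? (PySem.Str.lower question) " ").getD []
  let best := toks.foldl (fun best tok =>
      let r := PySem.Dict.getD rankB tok 6
      if r < best then r else best) (6 : Int)
  if best < 6 then (PySem.List.pyGet? levelsB best).getD "" else "L2"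

-- ===== PRECONDITION & SPEC =====
def Spec_detect_bloom_level (question : String) (out : String) : Prop := out = detect_bloom_level_alt question
instance (question : String) (out : String) : Decidable (Spec_detect_bloom_level question out) := by unfold Spec_detect_bloom_level; infer_instance

-- ===== CLAIM (what is proved, stated in full; the proofs are below) =====
def Claim_equal_detect_bloom_level : Prop := ∀ (question : String), Dom_detect_bloom_level question → Spec_detect_bloom_level question (detect_bloom_level question)

-- ===== LEMMAS AND PROOFS =====


def glue : List (List Char) → List Char
  | [] => []
  | [t] => t
  | t :: ts => t ++ ' ' :: glue ts

lemma glue_eq (ts : List (List Char)) : glue ts = List.intercalate [' '] ts := by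
  induction ts with
  | nil => simp [glue, List.intercalate]
  | cons t ts ih =>
    cases ts with
    | nil => simp [glue, List.intercalate]
    | cons u us => simp [glue, List.intercalate, List.intersperse] at ih ⊢; simp [ih]

lemma first_space (xs : List Char) : ∀ (ys a b : List Char), ' ' ∉ xs → ' ' ∉ a →
    xs ++ ' ' :: ys = a ++ ' ' :: b → xs = a ∧ ys = b := by
  induction xs with
  | nil =>
    intro ys a b _ ha h
    cases a with
    | nil => simpa using h
    | cons c a' => simp at h; simp [← h.1] at ha
  | cons x xs ih =>
    intro ys a b hxs ha h
    cases a with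
    | nil => simp at h; simp [h.1] at hxs
    | cons c a' =>
      simp at h
      obtain ⟨h1, h2⟩ := h
      have := ih ys a' b (by simp at hxs; exact hxs.2) (by simp at ha; exact ha.2) h2
      simp [h1, this.1, this.2]

lemma split_at_space (xs : List Char) : ∀ (ys a b : List Char), ' ' ∉ xs →
    xs ++ ' ' :: ys = a ++ ' ' :: b →
    (a = xs ∧ b = ys) ∨ ∃ a₂, a = xs ++ ' ' :: a₂ ∧ ys = a₂ ++ ' ' :: b := by
  induction xs with
  | nil =>
    intro ys a b _ h
    cases a with
    | nil => simp_all
    | cons c a' =>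
      simp at h
      right; exact ⟨a', by simp [← h.1], h.2⟩
  | cons x xs ih =>
    intro ys a b hxs h
    cases a with
    | nil => simp at h; simp [h.1] at hxs
    | cons c a' =>
      simp at h
      obtain ⟨h1, h2⟩ := h
      rcases ih ys a' b (by simp at hxs; exact hxs.2) h2 with ⟨ha, hb⟩ | ⟨a₂, ha, hy⟩
      · left; simp [h1, ha, hb]
      · right; exact ⟨a₂, by simp [h1, ha], hy⟩

lemma pfx_nil (v : List Char) (hv0 : v ≠ []) :
    ¬ ∃ b, glue [] ++ [' '] = v ++ ' ' :: b := by
  rintro ⟨b, h⟩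
  cases v with
  | nil => exact hv0 rfl
  | cons c v' => simp [glue] at h

lemma k_nil (v : List Char) :
    ¬ ∃ a b, glue [] ++ [' '] = a ++ (' ' :: v ++ [' ']) ++ b := by
  rintro ⟨a, b, h⟩
  have := congrArg List.length h
  simp [glue] at this
  omega

-- glue (t::ts') ++ [' '] = t ++ ' ' :: τ with τ described
lemma glue_cons_pad (t : List Char) (ts' : List (List Char)) :
    (ts' = [] ∧ glue (t :: ts') ++ [' '] = t ++ ' ' :: ([] : List Char)) ∨
    (ts' ≠ [] ∧ glue (t :: ts') ++ [' '] = t ++ ' ' :: (glue ts' ++ [' '])) := by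
  cases ts' with
  | nil => left; simp [glue]
  | cons u us => right; simp [glue]

lemma pfx_cons (v t : List Char) (ts' : List (List Char)) (hv : ' ' ∉ v) (ht : ' ' ∉ t) :
    (∃ b, glue (t :: ts') ++ [' '] = v ++ ' ' :: b) ↔ v = t := by
  rcases glue_cons_pad t ts' with ⟨-, hg⟩ | ⟨-, hg⟩ <;>
    constructor
  · rintro ⟨b, h⟩
    rw [hg] at h
    exact ((first_space t _ v b ht hv h).1).symm
  · rintro rfl; exact ⟨_, hg⟩
  · rintro ⟨b, h⟩
    rw [hg] at h
    exact ((first_space t _ v b ht hv h).1).symm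
  · rintro rfl; exact ⟨_, hg⟩

lemma k_cons (v t : List Char) (ts' : List (List Char)) (hv0 : v ≠ []) (hv : ' ' ∉ v) (ht : ' ' ∉ t) :
    (∃ a b, glue (t :: ts') ++ [' '] = a ++ (' ' :: v ++ [' ']) ++ b) ↔
      ((∃ b, glue ts' ++ [' '] = v ++ ' ' :: b) ∨
       (∃ a b, glue ts' ++ [' '] = a ++ (' ' :: v ++ [' ']) ++ b)) := by
  have hshape : ∀ (a b : List Char), a ++ (' ' :: v ++ [' ']) ++ b = a ++ ' ' :: (v ++ ' ' :: b) := by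
    intro a b; simp
  rcases glue_cons_pad t ts' with ⟨hnil, hg⟩ | ⟨hne, hg⟩
  · subst hnil
    constructor
    · rintro ⟨a, b, h⟩
      rw [hg, hshape] at h
      rcases split_at_space t _ a _ ht h with ⟨-, hb⟩ | ⟨a₂, -, hy⟩
      · exact absurd hb.symm (by cases v <;> simp_all)
      · simp at hy
    · rintro (⟨b, h⟩ | ⟨a, b, h⟩)
      · exact absurd ⟨b, h⟩ (pfx_nil v hv0)
      · exact absurd ⟨a, b, h⟩ (k_nil v)
  · constructor
    · rintro ⟨a, b, h⟩
      rw [hg, hshape] at h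
      rcases split_at_space t _ a _ ht h with ⟨-, hb⟩ | ⟨a₂, -, hy⟩
      · exact Or.inl ⟨b, hb.symm⟩
      · exact Or.inr ⟨a₂, b, by rw [hy, hshape]⟩
    · rintro (⟨b, h⟩ | ⟨a, b, h⟩)
      · exact ⟨t, b, by rw [hshape, hg, h]⟩
      · exact ⟨t ++ ' ' :: a, b, by rw [hshape, hg, h, hshape]; simp⟩

lemma mem_glue (v : List Char) (hv0 : v ≠ []) (hv : ' ' ∉ v) :
    ∀ ts : List (List Char), (∀ t ∈ ts, ' ' ∉ t) →
      (((∃ b, glue ts ++ [' '] = v ++ ' ' :: b) ∨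
        (∃ a b, glue ts ++ [' '] = a ++ (' ' :: v ++ [' ']) ++ b)) ↔ v ∈ ts) := by
  intro ts
  induction ts with
  | nil =>
    intro _
    simp only [List.not_mem_nil, iff_false]
    rintro (h | h)
    · exact pfx_nil v hv0 h
    · exact k_nil v h
  | cons t ts' ih =>
    intro hts
    have ht : ' ' ∉ t := hts t (by simp)
    rw [pfx_cons v t ts' hv ht, k_cons v t ts' hv0 hv ht, List.mem_cons,
      ← ih (fun u hu => hts u (by simp [hu]))]

lemma infix_iff (v cs : List Char) :
    (' ' :: v ++ [' ']) <:+: (' ' :: cs ++ [' ']) ↔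
      ((∃ b, cs ++ [' '] = v ++ ' ' :: b) ∨
       (∃ a b, cs ++ [' '] = a ++ (' ' :: v ++ [' ']) ++ b)) := by
  constructor
  · rintro ⟨s, t, h⟩
    cases s with
    | nil =>
      left
      simp at h
      exact ⟨t, by simp [h]⟩
    | cons c s' =>
      right
      simp at h
      exact ⟨s', t, by simp [h.2]⟩
  · rintro (⟨b, h⟩ | ⟨a, b, h⟩)
    · exact ⟨[], b, by simp [h]⟩
    · exact ⟨' ' :: a, b, by simp [h]⟩

lemma splitOn_nospace (cs : List Char) : ∀ t ∈ cs.splitOn ' ', ' ' ∉ t := by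
  induction cs with
  | nil => simp [List.splitOn, List.splitOnP_nil]
  | cons c cs ih =>
    intro t ht
    rw [List.splitOn, List.splitOnP_cons] at ht
    by_cases hc : c = ' '
    · simp [hc] at ht
      rcases ht with rfl | ht
      · simp
      · exact ih t ht
    · simp [hc] at ht
      rcases hsp : List.splitOnP (fun x => x == ' ') cs with _ | ⟨h0, t0⟩
      · exact absurd hsp (List.splitOnP_ne_nil _ _)
      · rw [hsp] at ht
        simp [List.modifyHead] at ht
        rcases ht with rfl | ht
        · have := ih h0 (by rw [List.splitOn, hsp]; simp)
          simp [this]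
          exact fun e => hc e.symm
        · exact ih t (by rw [List.splitOn, hsp]; simp [ht])

lemma glue_splitOn (cs : List Char) : glue (cs.splitOn ' ') = cs := by
  rw [glue_eq]; exact List.intercalate_splitOn cs ' '

lemma tok_iff (cs v : List Char) (hv0 : v ≠ []) (hv : ' ' ∉ v) :
    ((' ' :: v ++ [' ']) <:+: (' ' :: cs ++ [' ']) ↔ v ∈ cs.splitOn ' ') := by
  rw [infix_iff]
  conv_lhs => rw [← glue_splitOn cs]
  exact mem_glue v hv0 hv _ (splitOn_nospace cs)

lemma pysplit_go (fuel : Nat) : ∀ (l cur : List Char) (acc : List (List Char)), l.length < fuel →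
    PySem.Chars.splitOn.go [' '] fuel l cur acc =
      acc.reverse ++ (l.splitOn ' ').modifyHead (cur.reverse ++ ·) := by
  induction fuel with
  | zero => intro l _ _ h; simp at h
  | succ f ih =>
    intro l cur acc h
    cases l with
    | nil => simp [PySem.Chars.splitOn.go, List.splitOn, List.splitOnP_nil, List.modifyHead]
    | cons c rest =>
      rw [PySem.Chars.splitOn.go]
      by_cases hc : c = ' '
      · subst hc
        have hpre : List.isPrefixOf [' '] (' ' :: rest) = true := by simp [List.isPrefixOf]
        rw [if_pos hpre]
        simp only [List.length_cons] at h
        rw [ih _ _ _ (by simpa using Nat.lt_of_succ_lt_succ h)]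
        simp only [List.splitOn, List.splitOnP_cons, List.length_cons, List.drop_succ_cons,
          beq_self_eq_true, if_true, List.reverse_cons, List.modifyHead]
        simp
        rcases hsp : List.splitOnP (fun x => x == ' ') rest with _ | ⟨h0, t0⟩
        · exact absurd hsp (List.splitOnP_ne_nil _ _)
        · simp
      · have hpre : List.isPrefixOf [' '] (c :: rest) = false := by
          simp [List.isPrefixOf]; exact fun hh => absurd hh.symm hc
        rw [if_neg (by simp [hpre])]
        simp only [List.length_cons] at h
        rw [ih _ _ _ (Nat.lt_of_succ_lt_succ h)]
        have hcb : (c == ' ') = false := by simpa using hc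
        simp only [List.splitOn, List.splitOnP_cons, hcb, if_false, Bool.false_eq_true]
        rcases hsp : List.splitOnP (fun x => x == ' ') rest with _ | ⟨h0, t0⟩
        · exact absurd hsp (List.splitOnP_ne_nil _ _)
        · simp

lemma pysplit_eq (cs : List Char) : PySem.Chars.splitOn cs [' '] = cs.splitOn ' ' := by
  rw [PySem.Chars.splitOn, pysplit_go (cs.length + 1) cs [] [] (by omega)]
  rcases hsp : cs.splitOn ' ' with _ | ⟨h0, t0⟩
  · exact absurd hsp (by rw [List.splitOn]; exact List.splitOnP_ne_nil _ _)
  · simp [List.modifyHead]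

def toksOf (s : String) : List String := (s.toList.splitOn ' ').map String.ofList

def rankOf (tok : String) : Int := PySem.Dict.getD rankB tok 6

lemma toks_eq (s : String) : (PySem.Str.split? s " ").getD [] = toksOf s := by
  have h1 : (" " : String).toList = [' '] := by decide
  simp [PySem.Str.split?, PySem.Chars.split?, h1, pysplit_eq, toksOf]

lemma anyA_iff (q : String) (verbs : List String)
    (hverbs : ∀ v ∈ verbs, v.toList ≠ [] ∧ ' ' ∉ v.toList) :
    ((verbs.any (fun v => PySem.Str.isIn (" " ++ v ++ " ") (" " ++ q ++ " "))) = true ↔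
      ∃ t ∈ toksOf q, t ∈ verbs) := by
  rw [List.any_eq_true]
  constructor
  · rintro ⟨v, hvmem, hv⟩
    simp only [PySem.Str.isIn, PySem.Chars.isIn_iff_infix] at hv
    have h1 : (" " ++ v ++ " ").toList = ' ' :: v.toList ++ [' '] := by
      simp [String.toList_append]
    rw [h1] at hv
    have h2 : (" " ++ q ++ " ").toList = ' ' :: q.toList ++ [' '] := by
      simp [String.toList_append]
    rw [h2] at hv
    obtain ⟨hne, hns⟩ := hverbs v hvmem
    rw [tok_iff _ _ hne hns] at hv
    refine ⟨String.ofList v.toList, ?_, by simpa [String.ofList_toList] using hvmem⟩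
    simp only [toksOf, List.mem_map]
    exact ⟨v.toList, hv, rfl⟩
  · rintro ⟨t, htm, htv⟩
    refine ⟨t, htv, ?_⟩
    simp only [PySem.Str.isIn, PySem.Chars.isIn_iff_infix]
    have h1 : (" " ++ t ++ " ").toList = ' ' :: t.toList ++ [' '] := by
      simp [String.toList_append]
    have h2 : (" " ++ q ++ " ").toList = ' ' :: q.toList ++ [' '] := by
      simp [String.toList_append]
    rw [h1, h2]
    obtain ⟨hne, hns⟩ := hverbs t htv
    rw [tok_iff _ _ hne hns]
    simp only [toksOf, List.mem_map] at htm
    obtain ⟨w, hw, rfl⟩ := htm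
    simpa [String.toList_ofList] using hw

def blockOf (l : List String) (j : Int) : List (String × Int) := l.map (fun v => (v, j))

lemma rankB_eq : rankB = ⟨blockOf ["define", "list", "name", "state", "identify", "recall"] 0 ++
    (blockOf ["explain", "describe", "summarize", "classify", "outline"] 1 ++
    (blockOf ["solve", "use", "demonstrate", "compute", "apply"] 2 ++
    (blockOf ["compare", "differentiate", "analyze", "distinguish", "examine"] 3 ++
    (blockOf ["justify", "evaluate", "assess", "argue", "critique"] 4 ++
     blockOf ["design", "develop", "formulate", "construct", "create"] 5))))⟩ := rfl

lemma find_block (t : String) (l : List String) (j : Int) :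
    List.find? (fun p => p.1 == t) (blockOf l j) = if t ∈ l then some (t, j) else none := by
  induction l with
  | nil => simp [blockOf]
  | cons v l ih =>
    by_cases h : v = t
    · subst h
      simp [blockOf]
    · rw [blockOf, List.map_cons, List.find?_cons_of_neg (by simpa using h)]
      rw [← blockOf, ih]
      have hn : ¬ t = v := fun e => h e.symm
      simp [hn]

lemma rank_spec (s : String) : rankOf s =
    (if s ∈ ["define", "list", "name", "state", "identify", "recall"] then 0
     else if s ∈ ["explain", "describe", "summarize", "classify", "outline"] then 1
     else if s ∈ ["solve", "use", "demonstrate", "compute", "apply"] then 2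
     else if s ∈ ["compare", "differentiate", "analyze", "distinguish", "examine"] then 3
     else if s ∈ ["justify", "evaluate", "assess", "argue", "critique"] then 4
     else if s ∈ ["design", "develop", "formulate", "construct", "create"] then 5
     else 6) := by
  rw [rankOf, rankB_eq, PySem.Dict.getD, PySem.Dict.get?]
  simp only [List.find?_append, find_block]
  split_ifs <;> simp

lemma best_eq (toks : List String) :
    toks.foldl (fun best tok =>
        let r := PySem.Dict.getD rankB tok 6
        if r < best then r else best) (6 : Int) =
      (toks.map rankOf).foldl min 6 := by
  rw [List.foldl_map]
  congr 1
  funext b t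
  simp only [rankOf, min_def]
  split_ifs <;> omega


lemma rank_bounds (s : String) : 0 ≤ rankOf s ∧ rankOf s ≤ 6 := by
  rw [rank_spec]; split_ifs <;> omega

def bestOf (q : String) : Int := ((toksOf q).map rankOf).foldl min 6

lemma best_val (q : String) (k : Int) (hk6 : k < 6)
    (hub : ∃ t ∈ toksOf q, rankOf t ≤ k) (hlb : ∀ t ∈ toksOf q, k ≤ rankOf t) :
    bestOf q = k := by
  obtain ⟨t, ht, hle⟩ := hub
  have h1 : bestOf q ≤ rankOf t := (PySem.List.foldl_min_le ((toksOf q).map rankOf) 6).2 _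
    (List.mem_map_of_mem (f := rankOf) ht)
  rcases PySem.List.foldl_min_mem ((toksOf q).map rankOf) 6 with h2 | h2
  · have h2' : bestOf q = 6 := h2
    omega
  · obtain ⟨t', ht', he⟩ := List.mem_map.mp h2
    have he' : bestOf q = rankOf t' := he.symm
    have h3 := hlb t' ht'
    omega

lemma best_six (q : String) (hlb : ∀ t ∈ toksOf q, rankOf t = 6) : bestOf q = 6 := by
  rcases PySem.List.foldl_min_mem ((toksOf q).map rankOf) 6 with h2 | h2
  · exact h2
  · obtain ⟨t', ht', he⟩ := List.mem_map.mp h2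
    rw [bestOf, ← he]; exact hlb t' ht'

def vl1 : List String := ["define", "list", "name", "state", "identify", "recall"]
def vl2 : List String := ["explain", "describe", "summarize", "classify", "outline"]
def vl3 : List String := ["solve", "use", "demonstrate", "compute", "apply"]
def vl4 : List String := ["compare", "differentiate", "analyze", "distinguish", "examine"]
def vl5 : List String := ["justify", "evaluate", "assess", "argue", "critique"]
def vl6 : List String := ["design", "develop", "formulate", "construct", "create"]

lemma rank_spec' (s : String) : rankOf s =
    (if s ∈ vl1 then 0 else if s ∈ vl2 then 1 else if s ∈ vl3 then 2
     else if s ∈ vl4 then 3 else if s ∈ vl5 then 4 else if s ∈ vl6 then 5 else 6) := rank_spec s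

lemma core_eq (q : String) : findA q bloomA =
    (if bestOf q < 6 then (PySem.List.pyGet? levelsB (bestOf q)).getD "" else "L2") := by
  have hv1 : ∀ v ∈ vl1, v.toList ≠ [] ∧ ' ' ∉ v.toList := by decide
  have hv2 : ∀ v ∈ vl2, v.toList ≠ [] ∧ ' ' ∉ v.toList := by decide
  have hv3 : ∀ v ∈ vl3, v.toList ≠ [] ∧ ' ' ∉ v.toList := by decide
  have hv4 : ∀ v ∈ vl4, v.toList ≠ [] ∧ ' ' ∉ v.toList := by decide
  have hv5 : ∀ v ∈ vl5, v.toList ≠ [] ∧ ' ' ∉ v.toList := by decide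
  have hv6 : ∀ v ∈ vl6, v.toList ≠ [] ∧ ' ' ∉ v.toList := by decide
  show findA q [("L1", vl1), ("L2", vl2), ("L3", vl3), ("L4", vl4), ("L5", vl5), ("L6", vl6)] = _
  simp only [findA, anyA_iff q vl1 hv1, anyA_iff q vl2 hv2, anyA_iff q vl3 hv3,
    anyA_iff q vl4 hv4, anyA_iff q vl5 hv5, anyA_iff q vl6 hv6]
  by_cases h1 : ∃ t ∈ toksOf q, t ∈ vl1
  · rw [if_pos h1]
    obtain ⟨t, ht, htv⟩ := h1
    rw [best_val q 0 (by omega) ⟨t, ht, by rw [rank_spec']; split_ifs <;> simp_all⟩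
      (fun t' ht' => (rank_bounds t').1)]
    decide
  rw [if_neg h1]
  by_cases h2 : ∃ t ∈ toksOf q, t ∈ vl2
  · rw [if_pos h2]
    obtain ⟨t, ht, htv⟩ := h2
    rw [best_val q 1 (by omega) ⟨t, ht, by rw [rank_spec']; split_ifs <;> simp_all⟩ ?_]
    · decide
    intro t' ht'
    rw [rank_spec']
    split_ifs with c1 c2 c3 c4 c5 c6
    · exact absurd ⟨t', ht', c1⟩ h1
    · omega
    · omega
    · omega
    · omega
    · omega
    · omega
  rw [if_neg h2]
  by_cases h3 : ∃ t ∈ toksOf q, t ∈ vl3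
  · rw [if_pos h3]
    obtain ⟨t, ht, htv⟩ := h3
    rw [best_val q 2 (by omega) ⟨t, ht, by rw [rank_spec']; split_ifs <;> simp_all⟩ ?_]
    · decide
    intro t' ht'
    rw [rank_spec']
    split_ifs with c1 c2 c3 c4 c5 c6
    · exact absurd ⟨t', ht', c1⟩ h1
    · exact absurd ⟨t', ht', c2⟩ h2
    · omega
    · omega
    · omega
    · omega
    · omega
  rw [if_neg h3]
  by_cases h4 : ∃ t ∈ toksOf q, t ∈ vl4
  · rw [if_pos h4]
    obtain ⟨t, ht, htv⟩ := h4
    rw [best_val q 3 (by omega) ⟨t, ht, by rw [rank_spec']; split_ifs <;> simp_all⟩ ?_]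
    · decide
    intro t' ht'
    rw [rank_spec']
    split_ifs with c1 c2 c3 c4 c5 c6
    · exact absurd ⟨t', ht', c1⟩ h1
    · exact absurd ⟨t', ht', c2⟩ h2
    · exact absurd ⟨t', ht', c3⟩ h3
    · omega
    · omega
    · omega
    · omega
  rw [if_neg h4]
  by_cases h5 : ∃ t ∈ toksOf q, t ∈ vl5
  · rw [if_pos h5]
    obtain ⟨t, ht, htv⟩ := h5
    rw [best_val q 4 (by omega) ⟨t, ht, by rw [rank_spec']; split_ifs <;> simp_all⟩ ?_]
    · decide
    intro t' ht'
    rw [rank_spec']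
    split_ifs with c1 c2 c3 c4 c5 c6
    · exact absurd ⟨t', ht', c1⟩ h1
    · exact absurd ⟨t', ht', c2⟩ h2
    · exact absurd ⟨t', ht', c3⟩ h3
    · exact absurd ⟨t', ht', c4⟩ h4
    · omega
    · omega
    · omega
  rw [if_neg h5]
  by_cases h6 : ∃ t ∈ toksOf q, t ∈ vl6
  · rw [if_pos h6]
    obtain ⟨t, ht, htv⟩ := h6
    rw [best_val q 5 (by omega) ⟨t, ht, by rw [rank_spec']; split_ifs <;> simp_all⟩ ?_]
    · decide
    intro t' ht'
    rw [rank_spec']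
    split_ifs with c1 c2 c3 c4 c5 c6
    · exact absurd ⟨t', ht', c1⟩ h1
    · exact absurd ⟨t', ht', c2⟩ h2
    · exact absurd ⟨t', ht', c3⟩ h3
    · exact absurd ⟨t', ht', c4⟩ h4
    · exact absurd ⟨t', ht', c5⟩ h5
    · omega
    · omega
  rw [if_neg h6]
  rw [best_six q ?_]
  · decide
  intro t' ht'
  rw [rank_spec']
  split_ifs with c1 c2 c3 c4 c5 c6
  · exact absurd ⟨t', ht', c1⟩ h1
  · exact absurd ⟨t', ht', c2⟩ h2
  · exact absurd ⟨t', ht', c3⟩ h3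
  · exact absurd ⟨t', ht', c4⟩ h4
  · exact absurd ⟨t', ht', c5⟩ h5
  · exact absurd ⟨t', ht', c6⟩ h6
  · omega

-- ===== VERDICT (by name: the statement is the Claim_ definition above) =====
theorem detect_bloom_level_spec : Claim_equal_detect_bloom_level := by
  intro question _
  unfold Spec_detect_bloom_level detect_bloom_level detect_bloom_level_alt
  simp only [toks_eq, best_eq, core_eq, bestOf]
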